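-- pv_equiv track=rewrite | github.com/ValerianCoelho/Matrix-Calculator | MatrixDisplayer.py | getVerticalElementsLen
-- ===== SOURCE A (Python) =====
-- def getVerticalElementsLen(Matrix):
--     rows = len(Matrix)
--     cols = len(Matrix[0])
--     VerticalElementsLen = []
--     VerticalSign = []
--     for i in range(cols):
--         sign = 0
--         max = len(str(Matrix[0][i]))
--         for j in range(rows):
--             if len(str(Matrix[j][i])) > max:
--                 max = len(str(Matrix[j][i]))
--             if Matrix[j][i] < 0 and sign == 0:
--                 sign = 1
--         if sign == 1:
--             max = max + 1
--         VerticalElementsLen.append(max)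
--         VerticalSign.append(sign)
--     return VerticalElementsLen, VerticalSign
-- ===== SOURCE B (Python) =====
-- def getVerticalElementsLen(Matrix):
--     cols = len(Matrix[0])
--     maxes = [0] * cols
--     signs = [0] * cols
--     for row in Matrix:
--         maxes = [max(m, len(str(x))) for m, x in zip(maxes, row)]
--         signs = [1 if s or x < 0 else 0 for s, x in zip(signs, row)]
--     return [m + s for m, s in zip(maxes, signs)], signs
-- ===== Notes on version B (the rewrite author's own statement) =====
-- stated objective: alternative
-- what changed: Replaces A's column-major nested loops with scalar running max/sign accumulators by a single row-major sweep that maintains whole vectors of per-column accumulators (updated by zipping each row against them), adding the sign to the max only at the end.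
import Mathlib
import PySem

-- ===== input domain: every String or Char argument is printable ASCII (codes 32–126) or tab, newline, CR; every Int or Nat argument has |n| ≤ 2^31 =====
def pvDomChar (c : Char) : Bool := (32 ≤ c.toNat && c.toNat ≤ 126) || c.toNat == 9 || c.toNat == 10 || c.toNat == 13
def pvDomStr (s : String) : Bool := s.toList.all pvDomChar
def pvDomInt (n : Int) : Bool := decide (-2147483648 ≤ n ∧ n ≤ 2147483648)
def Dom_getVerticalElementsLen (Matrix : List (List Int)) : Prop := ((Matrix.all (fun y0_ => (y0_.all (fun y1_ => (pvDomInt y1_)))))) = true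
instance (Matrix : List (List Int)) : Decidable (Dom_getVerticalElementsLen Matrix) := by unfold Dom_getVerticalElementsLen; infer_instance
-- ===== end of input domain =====

-- B replaces A's column-major nested loops (scalar running max/sign per column) by a single
-- row-major sweep maintaining vectors of per-column accumulators; equivalence where A does not raise.

-- len(str(x)), written by both Pythons
def pvStrLen (x : Int) : Int := PySem.Str.len (PySem.Int.toStr x)

-- ===== PORT A =====
def getVerticalElementsLen (Matrix : List (List Int)) : List Int × List Int :=
  let rows : Int := PySem.List.len Matrix
  let cols : Int := PySem.List.len (PySem.List.pyGetD Matrix 0 [])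
  (PySem.List.pyRange 0 cols 1).foldl (fun (acc : List Int × List Int) i =>
    let r := (PySem.List.pyRange 0 rows 1).foldl (fun (ms : Int × Int) j =>
      ( if pvStrLen (PySem.List.pyGetD (PySem.List.pyGetD Matrix j []) i 0) > ms.1
          then pvStrLen (PySem.List.pyGetD (PySem.List.pyGetD Matrix j []) i 0) else ms.1,
        if PySem.List.pyGetD (PySem.List.pyGetD Matrix j []) i 0 < 0 ∧ ms.2 = 0 then 1 else ms.2 ))
      (pvStrLen (PySem.List.pyGetD (PySem.List.pyGetD Matrix 0 []) i 0), 0)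
    let mx := if r.2 = 1 then r.1 + 1 else r.1
    (acc.1 ++ [mx], acc.2 ++ [r.2])) ([], [])

-- ===== PORT B =====
-- one row-step: update the vectors of per-column accumulators by zipping the row against them
def pvRowStep (acc : List Int × List Int) (row : List Int) : List Int × List Int :=
  (List.zipWith (fun m x => max m (pvStrLen x)) acc.1 row,
   List.zipWith (fun s x => if s ≠ 0 ∨ x < 0 then 1 else 0) acc.2 row)

def getVerticalElementsLen_alt (Matrix : List (List Int)) : List Int × List Int :=
  let cols : Int := PySem.List.len (PySem.List.pyGetD Matrix 0 [])
  let init : List Int × List Int := (List.replicate cols.toNat 0, List.replicate cols.toNat 0)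
  let r := Matrix.foldl pvRowStep init
  (List.zipWith (fun m s => m + s) r.1 r.2, r.2)

-- ===== PRECONDITION & SPEC =====
-- Pre_ excludes exactly the inputs where A raises IndexError: the empty matrix (Matrix[0])
-- and matrices in which some row is shorter than the first row (Matrix[j][i]).
def Pre_getVerticalElementsLen (Matrix : List (List Int)) : Prop :=
  Matrix ≠ [] ∧ ∀ row ∈ Matrix, (Matrix.headD []).length ≤ row.length
instance (Matrix : List (List Int)) : Decidable (Pre_getVerticalElementsLen Matrix) := by
  unfold Pre_getVerticalElementsLen; infer_instance
def pvWitness_getVerticalElementsLen : List (List Int) := [[1, -22], [333, 4]]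

def Spec_getVerticalElementsLen (Matrix : List (List Int)) (out : List Int × List Int) : Prop := out = getVerticalElementsLen_alt Matrix
instance (Matrix : List (List Int)) (out : List Int × List Int) : Decidable (Spec_getVerticalElementsLen Matrix out) := by unfold Spec_getVerticalElementsLen; infer_instance

-- ===== CLAIM (what is proved, stated in full; the proofs are below) =====
def Claim_equal_getVerticalElementsLen : Prop := ∀ (Matrix : List (List Int)), Dom_getVerticalElementsLen Matrix → Pre_getVerticalElementsLen Matrix → Spec_getVerticalElementsLen Matrix (getVerticalElementsLen Matrix)

-- ===== LEMMAS AND PROOFS =====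

lemma pvStrLen_nonneg (x : Int) : 0 ≤ pvStrLen x := by
  simp [pvStrLen, PySem.Str.len_eq]

-- a list of length n is the range-n map of its getD
lemma pvList_eq_map_range (l : List Int) : l = (List.range l.length).map (fun k => l.getD k 0) := by
  apply List.ext_getElem
  · simp
  · intro i h1 h2
    simp [List.getD_eq_getElem?_getD, List.getElem?_eq_getElem h1]

-- B's row-major fold, read column-wise (the loop-exchange lemma)
lemma pvFold_rowStep (rows : List (List Int)) (aM aS : List Int) (n : Nat)
    (hM : aM.length = n) (hS : aS.length = n) (hr : ∀ row ∈ rows, n ≤ row.length) :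
    rows.foldl pvRowStep (aM, aS)
      = ((List.range n).map (fun k =>
            rows.foldl (fun m row => max m (pvStrLen (row.getD k 0))) (aM.getD k 0)),
         (List.range n).map (fun k =>
            rows.foldl (fun s row => if s ≠ 0 ∨ row.getD k 0 < 0 then 1 else 0) (aS.getD k 0))) := by
  induction rows generalizing aM aS with
  | nil =>
    subst hM
    simp only [List.foldl_nil]
    exact Prod.ext (pvList_eq_map_range aM) (by rw [← hS]; exact pvList_eq_map_range aS)
  | cons row rest ih =>
    have hlen : n ≤ row.length := hr row (List.mem_cons_self)
    have hz1 : (List.zipWith (fun m x => max m (pvStrLen x)) aM row).length = n := by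
      simp [hM]; omega
    have hz2 : (List.zipWith (fun s x => if s ≠ 0 ∨ x < 0 then (1:Int) else 0) aS row).length = n := by
      simp [hS]; omega
    rw [List.foldl_cons, show pvRowStep (aM, aS) row
        = (List.zipWith (fun m x => max m (pvStrLen x)) aM row,
           List.zipWith (fun s x => if s ≠ 0 ∨ x < 0 then (1:Int) else 0) aS row) from rfl,
      ih _ _ hz1 hz2 (fun r hr' => hr r (List.mem_cons_of_mem _ hr'))]
    have hg1 : ∀ k ∈ List.range n,
        (List.zipWith (fun m x => max m (pvStrLen x)) aM row).getD k 0
          = max (aM.getD k 0) (pvStrLen (row.getD k 0)) := by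
      intro k hk
      have hk' : k < n := List.mem_range.mp hk
      rw [List.getD_eq_getElem _ _ (by rw [hz1]; exact hk'),
        List.getElem_zipWith, List.getD_eq_getElem _ _ (by omega),
        List.getD_eq_getElem _ _ (by omega)]
    have hg2 : ∀ k ∈ List.range n,
        (List.zipWith (fun s x => if s ≠ 0 ∨ x < 0 then (1:Int) else 0) aS row).getD k 0
          = (if aS.getD k 0 ≠ 0 ∨ row.getD k 0 < 0 then (1:Int) else 0) := by
      intro k hk
      have hk' : k < n := List.mem_range.mp hk
      rw [List.getD_eq_getElem _ _ (by rw [hz2]; exact hk'),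
        List.getElem_zipWith, List.getD_eq_getElem _ _ (by omega),
        List.getD_eq_getElem _ _ (by omega)]
    exact Prod.ext
      (List.map_congr_left (fun k hk => by rw [List.foldl_cons, hg1 k hk]))
      (List.map_congr_left (fun k hk => by rw [List.foldl_cons, hg2 k hk]))

-- both sign loops compute "any negative in the column"
lemma pvSignFoldB_one (l : List Int) :
    l.foldl (fun s v => if s ≠ 0 ∨ v < 0 then (1 : Int) else 0) 1 = 1 := by
  induction l with
  | nil => rfl
  | cons a t ih => simpa using ih

lemma pvSignFoldB_eq (l : List Int) :
    l.foldl (fun s v => if s ≠ 0 ∨ v < 0 then (1 : Int) else 0) 0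
      = if l.any (fun x => decide (x < 0)) then 1 else 0 := by
  induction l with
  | nil => rfl
  | cons a t ih =>
    by_cases ha : a < 0
    · simp [ha, pvSignFoldB_one]
    · simp [ha, ih]

lemma pvSignFoldA_one (l : List Int) :
    l.foldl (fun s v => if v < 0 ∧ s = 0 then (1 : Int) else s) 1 = 1 := by
  induction l with
  | nil => rfl
  | cons a t ih => simpa using ih

lemma pvSignFoldA_eq (l : List Int) :
    l.foldl (fun s v => if v < 0 ∧ s = 0 then (1 : Int) else s) 0
      = if l.any (fun x => decide (x < 0)) then 1 else 0 := by
  induction l with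
  | nil => rfl
  | cons a t ih =>
    by_cases ha : a < 0
    · simp [ha, pvSignFoldA_one]
    · simp [ha, ih]

-- A's running-max step is Int.max
lemma pvIfGtEqMax (a b : Int) : (if b > a then b else a) = max a b := by omega

-- A's append-accumulating outer loop over range is a pair of maps
lemma pvFoldAppendPair (f g : Nat → Int) (l : List Nat) (a b : List Int) :
    l.foldl (fun acc i => (acc.1 ++ [f i], acc.2 ++ [g i])) (a, b)
      = (a ++ l.map f, b ++ l.map g) := by
  induction l generalizing a b with
  | nil => simp
  | cons x t ih => simp [ih]

-- ===== VERDICT (by name: the statement is the Claim_ definition above) =====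
theorem getVerticalElementsLen_spec : Claim_equal_getVerticalElementsLen := by
  intro M _ hPre
  unfold Spec_getVerticalElementsLen
  obtain ⟨hne, hall⟩ := hPre
  cases M with
  | nil => exact absurd rfl hne
  | cons r rs =>
  simp only [List.headD_cons] at hall
  have hrows : ∀ row ∈ r :: rs, r.length ≤ row.length := hall
  unfold getVerticalElementsLen getVerticalElementsLen_alt
  simp only [PySem.List.len_eq, PySem.List.pyGetD_zero_cons, Int.toNat_natCast]
  -- B side: exchange the loops
  rw [pvFold_rowStep (r :: rs) _ _ r.length (by simp) (by simp) hrows]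
  -- A side: turn the append loop into a pair of maps
  rw [PySem.List.pyRange_zero_nat r.length, List.foldl_map]
  have hA := pvFoldAppendPair
    (fun k =>
      let q := (PySem.List.pyRange 0 ((r :: rs).length : Int) 1).foldl (fun (ms : Int × Int) j =>
        ( if pvStrLen (PySem.List.pyGetD (PySem.List.pyGetD (r :: rs) j []) (k : Int) 0) > ms.1
            then pvStrLen (PySem.List.pyGetD (PySem.List.pyGetD (r :: rs) j []) (k : Int) 0) else ms.1,
          if PySem.List.pyGetD (PySem.List.pyGetD (r :: rs) j []) (k : Int) 0 < 0 ∧ ms.2 = 0 then 1 else ms.2 ))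
        (pvStrLen (PySem.List.pyGetD r (k : Int) 0), 0)
      if q.2 = 1 then q.1 + 1 else q.1)
    (fun k =>
      ((PySem.List.pyRange 0 ((r :: rs).length : Int) 1).foldl (fun (ms : Int × Int) j =>
        ( if pvStrLen (PySem.List.pyGetD (PySem.List.pyGetD (r :: rs) j []) (k : Int) 0) > ms.1
            then pvStrLen (PySem.List.pyGetD (PySem.List.pyGetD (r :: rs) j []) (k : Int) 0) else ms.1,
          if PySem.List.pyGetD (PySem.List.pyGetD (r :: rs) j []) (k : Int) 0 < 0 ∧ ms.2 = 0 then 1 else ms.2 ))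
        (pvStrLen (PySem.List.pyGetD r (k : Int) 0), 0)).2)
    (List.range r.length) [] []
  rw [hA]
  simp only [List.nil_append]
  -- now compare the maps and the zipWiths columnwise
  have hcol : ∀ k, k < r.length →
      ((PySem.List.pyRange 0 ((r :: rs).length : Int) 1).foldl (fun (ms : Int × Int) j =>
        ( if pvStrLen (PySem.List.pyGetD (PySem.List.pyGetD (r :: rs) j []) (k : Int) 0) > ms.1
            then pvStrLen (PySem.List.pyGetD (PySem.List.pyGetD (r :: rs) j []) (k : Int) 0) else ms.1,
          if PySem.List.pyGetD (PySem.List.pyGetD (r :: rs) j []) (k : Int) 0 < 0 ∧ ms.2 = 0 then 1 else ms.2 ))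
        (pvStrLen (PySem.List.pyGetD r (k : Int) 0), 0))
      = ((r :: rs).foldl (fun m row => max m (pvStrLen (row.getD k 0))) 0,
         if (r :: rs).any (fun row => decide (row.getD k 0 < 0)) then 1 else 0) := by
    intro k hk
    simp only [PySem.List.pyGetD_natCast]
    rw [PySem.List.foldl_pyRange_zero_pyGetD' (r :: rs) [] (fun (ms : Int × Int) row =>
        ( if pvStrLen (row.getD k 0) > ms.1 then pvStrLen (row.getD k 0) else ms.1,
          if row.getD k 0 < 0 ∧ ms.2 = 0 then 1 else ms.2 ))
        (pvStrLen (r.getD k 0), 0)]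
    rw [PySem.List.foldl_prod_mk
        (fun (m : Int) (row : List Int) => if pvStrLen (row.getD k 0) > m then pvStrLen (row.getD k 0) else m)
        (fun (s : Int) (row : List Int) => if row.getD k 0 < 0 ∧ s = 0 then 1 else s)]
    refine Prod.ext ?_ ?_
    · -- max part: A starts at the first row's value, B at 0
      show ((r :: rs).foldl
          (fun (m : Int) row => if pvStrLen (row.getD k 0) > m then pvStrLen (row.getD k 0) else m)
          (pvStrLen (r.getD k 0)))
        = (r :: rs).foldl (fun m row => max m (pvStrLen (row.getD k 0))) 0
      have := pvStrLen_nonneg (r.getD k 0)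
      simp only [List.foldl_cons, pvIfGtEqMax, max_self]
      rw [show max (0 : Int) (pvStrLen (r.getD k 0)) = pvStrLen (r.getD k 0) by omega]
    · show ((r :: rs).foldl
          (fun (s : Int) row => if row.getD k 0 < 0 ∧ s = 0 then 1 else s) 0)
        = if (r :: rs).any (fun row => decide (row.getD k 0 < 0)) then 1 else 0
      rw [show ((r :: rs).foldl
            (fun (s : Int) row => if row.getD k 0 < 0 ∧ s = 0 then (1 : Int) else s) 0)
          = (((r :: rs).map (fun row => row.getD k 0)).foldl
            (fun (s : Int) v => if v < 0 ∧ s = 0 then (1 : Int) else s) 0) from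
          (List.foldl_map (f := fun (row : List Int) => row.getD k 0)
            (g := fun (s : Int) v => if v < 0 ∧ s = 0 then (1 : Int) else s)
            (l := r :: rs) (init := 0)).symm, pvSignFoldA_eq]
      simp [List.any_map]
  -- B's replicate accumulators start at 0
  have hrep : ∀ k, (List.replicate r.length (0 : Int)).getD k 0 = 0 := by
    intro k
    by_cases hk : k < r.length
    · rw [List.getD_eq_getElem _ _ (by simpa using hk)]; simp
    · rw [List.getD_eq_default _ _ (by simpa using hk)]
  refine Prod.ext ?_ ?_
  · -- first components: map over range vs zipWith of two maps over range
    show (List.range r.length).map _ = List.zipWith _ ((List.range r.length).map _) ((List.range r.length).map _)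
    rw [List.zipWith_map, List.zipWith_self]
    apply List.map_congr_left
    intro k hk
    have hk' : k < r.length := List.mem_range.mp hk
    rw [hcol k hk']
    simp only [hrep]
    rw [show ((r :: rs).foldl (fun s row => if s ≠ 0 ∨ row.getD k 0 < 0 then (1:Int) else 0) 0)
        = (((r :: rs).map (fun row => row.getD k 0)).foldl
            (fun (s : Int) v => if s ≠ 0 ∨ v < 0 then (1 : Int) else 0) 0) from
        (List.foldl_map (f := fun (row : List Int) => row.getD k 0)
          (g := fun (s : Int) v => if s ≠ 0 ∨ v < 0 then (1 : Int) else 0)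
          (l := r :: rs) (init := 0)).symm, pvSignFoldB_eq]
    simp only [List.any_map, Function.comp_def]
    by_cases hE : ∃ x ∈ rs, x[k]?.getD 0 < 0
    · simp [hE]
    · by_cases ha : r[k]?.getD 0 < 0
      · simp [ha]
      · have ha' : 0 ≤ r[k]?.getD 0 := by omega
        simp [hE, ha']
  · show (List.range r.length).map _ = (List.range r.length).map _
    apply List.map_congr_left
    intro k hk
    have hk' : k < r.length := List.mem_range.mp hk
    rw [hcol k hk']
    simp only [hrep]
    rw [show ((r :: rs).foldl (fun s row => if s ≠ 0 ∨ row.getD k 0 < 0 then (1:Int) else 0) 0)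
        = (((r :: rs).map (fun row => row.getD k 0)).foldl
            (fun (s : Int) v => if s ≠ 0 ∨ v < 0 then (1 : Int) else 0) 0) from
        (List.foldl_map (f := fun (row : List Int) => row.getD k 0)
          (g := fun (s : Int) v => if s ≠ 0 ∨ v < 0 then (1 : Int) else 0)
          (l := r :: rs) (init := 0)).symm, pvSignFoldB_eq]
    simp only [List.any_map, Function.comp_def]
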